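-- pv_equiv track=rewrite | github.com/cancervariants/variation-normalization | src/variation/validators/validator.py | validate_5_prime_to_3_prime
-- ===== SOURCE A (Python) =====
-- from typing import Literal
--
-- def validate_5_prime_to_3_prime(
--     pos0: int,
--     pos1: int | Literal["?"] | None,
--     pos2: int | Literal["?"] | None = None,
--     pos3: int | Literal["?"] | None = None,
-- ) -> str | None:
--     """Validate that positions are unique and listed from 5' to 3'
--
--     :param pos0: Position 0
--     :param pos1: Position 1
--     :param pos2: Position 2
--     :param pos3: Position 3
--     :return: Message if positions are not unique or not listed from 5' to 3'.
--         Else, `None`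
--     """
--     prev_pos = None
--     invalid_msg = None
--     for pos in [pos0, pos1, pos2, pos3]:
--         if pos not in {"?", None}:
--             if prev_pos is None:
--                 prev_pos = pos
--             else:
--                 if pos <= prev_pos:
--                     invalid_msg = (
--                         "Positions should contain two different positions and "
--                         "should be listed from 5' to 3'"
--                     )
--                     break
--
--                 prev_pos = pos
--     return invalid_msg
-- ===== SOURCE B (Python) =====
-- from typing import Literal
--
-- def validate_5_prime_to_3_prime(
--     pos0: int,
--     pos1: int | Literal["?"] | None,
--     pos2: int | Literal["?"] | None = None,
--     pos3: int | Literal["?"] | None = None,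
-- ) -> str | None:
--     """Validate that positions are unique and listed from 5' to 3'"""
--     # Pass 1: keep only concrete positions.
--     vals = [p for p in (pos0, pos1, pos2, pos3) if p not in ("?", None)]
--     # Pass 2: brute-force all-pairs check: every earlier position must be
--     # strictly smaller than every later one (correct because '<' is
--     # transitive, so all-pairs ascending <=> adjacent ascending).
--     n = len(vals)
--     for i in range(n):
--         for j in range(i + 1, n):
--             if vals[i] >= vals[j]:
--                 return (
--                     "Positions should contain two different positions and "
--                     "should be listed from 5' to 3'"
--                 )
--     return None
-- ===== Notes on version B (the rewrite author's own statement) =====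
-- stated objective: alternative
-- what changed: Replaced A's fused single scan with prev_pos bookkeeping and break by a two-stage strategy: filter out '?'/None first, then a brute-force all-pairs nested-loop comparison (every earlier value strictly below every later one), correct by transitivity of <.
import Mathlib
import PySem

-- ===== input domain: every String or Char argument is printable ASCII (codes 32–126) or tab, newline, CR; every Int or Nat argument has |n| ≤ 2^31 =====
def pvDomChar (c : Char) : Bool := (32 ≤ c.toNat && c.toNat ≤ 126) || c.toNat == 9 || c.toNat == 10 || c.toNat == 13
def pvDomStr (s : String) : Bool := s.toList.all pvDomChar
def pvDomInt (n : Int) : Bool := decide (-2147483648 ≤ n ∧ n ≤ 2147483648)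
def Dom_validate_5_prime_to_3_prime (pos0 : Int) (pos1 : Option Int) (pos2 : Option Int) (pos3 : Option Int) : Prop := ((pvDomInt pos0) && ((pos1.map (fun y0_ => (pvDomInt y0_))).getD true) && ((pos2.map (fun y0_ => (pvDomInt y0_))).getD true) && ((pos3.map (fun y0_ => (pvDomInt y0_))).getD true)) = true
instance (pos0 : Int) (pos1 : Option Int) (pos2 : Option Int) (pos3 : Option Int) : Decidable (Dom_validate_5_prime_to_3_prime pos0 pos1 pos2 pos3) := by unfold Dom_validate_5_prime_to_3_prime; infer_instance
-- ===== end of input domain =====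

-- B replaces A's fused single scan (prev_pos bookkeeping + break) by a
-- filter pass followed by a brute-force all-pairs comparison; objective: alternative.

def pvInvalidMsg : String :=
  "Positions should contain two different positions and should be listed from 5' to 3'"

-- ===== PORT A =====
-- the for-loop of A: state is prev_pos; `break` is modelled by returning immediately
def validateLoopA : List (Option Int) → Option Int → Option String
  | [], _ => none
  | o :: rest, prev =>
    match o with
    | none => validateLoopA rest prev
    | some p =>
      match prev with
      | none => validateLoopA rest (some p)
      | some q => if p ≤ q then some pvInvalidMsg else validateLoopA rest (some p)

def validate_5_prime_to_3_prime (pos0 : Int) (pos1 : Option Int) (pos2 : Option Int) (pos3 : Option Int) : Option String :=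
  validateLoopA [some pos0, pos1, pos2, pos3] none

-- ===== PORT B =====
-- B's nested loops: the outer loop picks vals[i] (the head at each step),
-- the inner loop scans the later values and early-returns on the first violation
def pairLoopB : List Int → Option String
  | [] => none
  | p :: rest => if rest.any (fun q => q ≤ p) then some pvInvalidMsg else pairLoopB rest

def validate_5_prime_to_3_prime_alt (pos0 : Int) (pos1 : Option Int) (pos2 : Option Int) (pos3 : Option Int) : Option String :=
  -- pass 1: keep only concrete positions
  let vals : List Int := ([some pos0, pos1, pos2, pos3] : List (Option Int)).filterMap id
  -- pass 2: all-pairs check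
  pairLoopB vals

-- ===== PRECONDITION & SPEC =====
def Spec_validate_5_prime_to_3_prime (pos0 : Int) (pos1 : Option Int) (pos2 : Option Int) (pos3 : Option Int) (out : Option String) : Prop := out = validate_5_prime_to_3_prime_alt pos0 pos1 pos2 pos3
instance (pos0 : Int) (pos1 : Option Int) (pos2 : Option Int) (pos3 : Option Int) (out : Option String) : Decidable (Spec_validate_5_prime_to_3_prime pos0 pos1 pos2 pos3 out) := by unfold Spec_validate_5_prime_to_3_prime; infer_instance

-- ===== CLAIM (what is proved, stated in full; the proofs are below) =====
def Claim_equal_validate_5_prime_to_3_prime : Prop := ∀ (pos0 : Int) (pos1 : Option Int) (pos2 : Option Int) (pos3 : Option Int), Dom_validate_5_prime_to_3_prime pos0 pos1 pos2 pos3 → Spec_validate_5_prime_to_3_prime pos0 pos1 pos2 pos3 (validate_5_prime_to_3_prime pos0 pos1 pos2 pos3)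

-- ===== LEMMAS AND PROOFS =====

-- proof-only helper: A's loop restricted to the already-filtered values
def loopAf : List Int → Option Int → Option String
  | [], _ => none
  | p :: rest, none => loopAf rest (some p)
  | p :: rest, some q => if p ≤ q then some pvInvalidMsg else loopAf rest (some p)

theorem loopA_eq_loopAf (os : List (Option Int)) :
    ∀ prev, validateLoopA os prev = loopAf (os.filterMap id) prev := by
  induction os with
  | nil => intro prev; rfl
  | cons o rest ih =>
    intro prev
    cases o with
    | none => simpa [validateLoopA] using ih prev
    | some p =>
      cases prev with
      | none => simpa [validateLoopA, loopAf] using ih (some p)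
      | some q =>
        simp only [validateLoopA, List.filterMap_cons, id, loopAf]
        split_ifs with h <;> simp [ih]

-- A's loop (on filtered values) returns none iff adjacent values are strictly ascending
theorem loopAf_char (vs : List Int) :
    ∀ q : Int, loopAf vs (some q) =
      if List.IsChain (· < ·) (q :: vs) then none else some pvInvalidMsg := by
  induction vs with
  | nil => intro q; simp [loopAf]
  | cons p rest ih =>
    intro q
    simp only [loopAf, ih p, List.isChain_cons_cons]
    by_cases h : p ≤ q
    · have : ¬ q < p := by omega
      simp [h, this]
    · have hqp : q < p := by omega
      split_ifs <;> simp_all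

-- B's nested loops return none iff all pairs are strictly ascending
theorem pairLoopB_char (vs : List Int) :
    pairLoopB vs = if List.Pairwise (· < ·) vs then none else some pvInvalidMsg := by
  induction vs with
  | nil => simp [pairLoopB]
  | cons p rest ih =>
    simp only [pairLoopB, ih, List.pairwise_cons, List.any_eq_true, decide_eq_true_eq]
    by_cases h : ∃ q ∈ rest, q ≤ p
    · obtain ⟨q, hq, hle⟩ := h
      have hn : ¬ ((∀ a ∈ rest, p < a) ∧ List.Pairwise (· < ·) rest) := by
        rintro ⟨hall, -⟩; exact absurd (hall q hq) (by omega)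
      rw [if_pos ⟨q, hq, hle⟩, if_neg hn]
    · rw [if_neg h]
      have hall : ∀ a ∈ rest, p < a := by
        intro a ha; by_contra hc; exact h ⟨a, ha, by omega⟩
      by_cases hp : List.Pairwise (· < ·) rest
      · rw [if_pos hp, if_pos ⟨hall, hp⟩]
      · rw [if_neg hp, if_neg (by rintro ⟨-, h2⟩; exact hp h2)]

-- ===== VERDICT (by name: the statement is the Claim_ definition above) =====
theorem validate_5_prime_to_3_prime_spec : Claim_equal_validate_5_prime_to_3_prime := by
  intro pos0 pos1 pos2 pos3 _
  unfold Spec_validate_5_prime_to_3_prime validate_5_prime_to_3_prime validate_5_prime_to_3_prime_alt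
  rw [loopA_eq_loopAf]
  show loopAf (List.filterMap id [pos1, pos2, pos3]) (some pos0) =
    pairLoopB (List.filterMap id [some pos0, pos1, pos2, pos3])
  rw [loopAf_char, pairLoopB_char]
  have : List.filterMap id [some pos0, pos1, pos2, pos3] =
      pos0 :: List.filterMap id [pos1, pos2, pos3] := by simp
  rw [this]; simp only [List.isChain_iff_pairwise]
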